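-- pv_equiv track=rewrite | github.com/SCCoCo/SmartCoCo | SmartCoCo/analyzer/check_intent.py | generate_candidate_fact_path
-- ===== SOURCE A (Python) =====
-- def generate_candidate_fact_path(paths):
--     res = {}
--     for path in paths:
--         for i in range(len(path)):
--             if not res.__contains__(path[i]):
--                 res[path[i]] = []
--             for j in range(len(path)):
--                 res[path[i]].append(path[j])
--     return res
-- ===== SOURCE B (Python) =====
-- def generate_candidate_fact_path(paths):
--     # Inverted-index algorithm in two phases: phase 1 builds, in one linear scan,
--     # an index from each element to the list of paths it occurs in (one entry per
--     # occurrence, O(1) per element since only a reference is appended); phase 2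
--     # materialises each value by flattening that path list in one comprehension.
--     occ = {}
--     for path in paths:
--         for x in path:
--             occ.setdefault(x, []).append(path)
--     return {e: [x for p in ps for x in p] for e, ps in occ.items()}
-- ===== Notes on version B (the rewrite author's own statement) =====
-- stated objective: alternative
-- what changed: Replaces A's one-phase quadratic accumulation (which appends the whole path element by element into the result dict at every occurrence) with a two-phase inverted index: a linear scan records, per element, one reference to each path it occurs in, and a second pass materialises every value by flattening that path list; correct because each key's final list is the concatenation of its occurrence paths in scan order.
import Mathlib
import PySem

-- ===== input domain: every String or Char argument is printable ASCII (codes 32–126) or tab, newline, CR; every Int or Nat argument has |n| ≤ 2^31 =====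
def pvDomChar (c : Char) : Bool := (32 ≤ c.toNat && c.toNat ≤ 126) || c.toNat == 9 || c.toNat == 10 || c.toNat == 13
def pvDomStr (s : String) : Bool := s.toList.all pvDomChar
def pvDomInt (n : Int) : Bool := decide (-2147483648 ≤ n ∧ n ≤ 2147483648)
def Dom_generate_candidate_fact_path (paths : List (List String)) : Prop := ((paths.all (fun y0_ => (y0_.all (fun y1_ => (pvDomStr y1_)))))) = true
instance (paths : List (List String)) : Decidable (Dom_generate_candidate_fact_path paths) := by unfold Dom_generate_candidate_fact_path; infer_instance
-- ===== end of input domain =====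

-- B replaces A's one-phase quadratic accumulation with a two-phase inverted index: a linear scan
-- records each element's occurrence paths, a second pass flattens them into the values; same result.


-- ===== PORT A =====
-- res[path[i]].append(path[j]) is ported as Dict.modify with default []: at that point the key
-- is always present (it was just inserted if missing), so the default is never used.
def generate_candidate_fact_path (paths : List (List String)) : List (String × List String) :=
  (paths.foldl (fun res path =>
      (PySem.List.pyRange 0 (PySem.List.len path) 1).foldl (fun res i =>
        let e := PySem.List.pyGetD path i ""
        let res := if res.contains e then res else res.insert e ([] : List String)
        (PySem.List.pyRange 0 (PySem.List.len path) 1).foldl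
          (fun res j => res.modify e [] (fun v => v ++ [PySem.List.pyGetD path j ""])) res)
        res)
    PySem.Dict.empty).items

-- ===== PORT B =====
-- occ.setdefault(x, []).append(path) is Dict.modify x [] (v ++ [path]); the value
-- comprehension [x for p in ps for x in p] is ps.flatMap (fun p => p).
def generate_candidate_fact_path_alt (paths : List (List String)) : List (String × List String) :=
  let occ : PySem.Dict String (List (List String)) :=
    paths.foldl (fun occ path =>
      path.foldl (fun occ x => occ.modify x [] (fun v => v ++ [path])) occ) PySem.Dict.empty
  occ.items.map (fun p => (p.1, p.2.flatMap (fun q => q)))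

-- ===== PRECONDITION & SPEC =====
def Spec_generate_candidate_fact_path (paths : List (List String)) (out : List (String × List String)) : Prop := out = generate_candidate_fact_path_alt paths
instance (paths : List (List String)) (out : List (String × List String)) : Decidable (Spec_generate_candidate_fact_path paths out) := by unfold Spec_generate_candidate_fact_path; infer_instance

-- ===== CLAIM (what is proved, stated in full; the proofs are below) =====
def Claim_equal_generate_candidate_fact_path : Prop := ∀ (paths : List (List String)), Dom_generate_candidate_fact_path paths → Spec_generate_candidate_fact_path paths (generate_candidate_fact_path paths)

-- ===== LEMMAS AND PROOFS =====

-- A's per-path step (the body of its outer fold), named for the proofs.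
def pvAstep (res : PySem.Dict String (List String)) (path : List String) : PySem.Dict String (List String) :=
  (PySem.List.pyRange 0 (PySem.List.len path) 1).foldl (fun res i =>
    let e := PySem.List.pyGetD path i ""
    let res := if res.contains e then res else res.insert e ([] : List String)
    (PySem.List.pyRange 0 (PySem.List.len path) 1).foldl
      (fun res j => res.modify e [] (fun v => v ++ [PySem.List.pyGetD path j ""])) res) res

-- A's per-occurrence step with the index loops removed (inner loop still a range fold).
def pvF (P : List String) (res : PySem.Dict String (List String)) (e : String) : PySem.Dict String (List String) :=
  (PySem.List.pyRange 0 (PySem.List.len P) 1).foldl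
    (fun res j => res.modify e [] (fun v => v ++ [PySem.List.pyGetD P j ""]))
    (if res.contains e then res else res.insert e ([] : List String))

-- A's per-occurrence step, fully on lists: ensure key e, then append all of P to its list.
def pvStepA (P : List String) (d : PySem.Dict String (List String)) (e : String) : PySem.Dict String (List String) :=
  P.foldl (fun d x => d.modify e [] (fun v => v ++ [x]))
    (if d.contains e then d else d.insert e ([] : List String))

lemma pvAppendFold_getD (Q : List String) (e : String) :
    ∀ (d : PySem.Dict String (List String)) (c : String),
      (Q.foldl (fun d x => d.modify e [] (fun v => v ++ [x])) d).getD c [] =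
        if c = e then d.getD c [] ++ Q else d.getD c [] := by
  induction Q with
  | nil => intro d c; by_cases hc : c = e <;> simp [hc]
  | cons x Q ih =>
      intro d c
      simp only [List.foldl_cons]
      rw [ih, PySem.Dict.getD_modify]
      by_cases hc : c = e
      · subst hc; simp
      · simp [hc]

lemma pvSet_update_subset (s : PySem.Set String) (l : List String) (h : ∀ x ∈ l, x ∈ s) :
    PySem.Set.update s l = s := by
  rw [PySem.Set.update_eq_append_filter]
  have hnil : (PySem.Set.ofList l).filter (fun y => !(PySem.Set.contains s y)) = [] := by
    rw [List.filter_eq_nil_iff]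
    intro a ha
    have hm : a ∈ l := (PySem.Set.mem_ofList _ _).mp ha
    simpa using h a hm
  rw [hnil, List.append_nil]

theorem pvStepA_getD (P : List String) (d : PySem.Dict String (List String)) (e c : String) :
    (pvStepA P d e).getD c [] = if c = e then d.getD c [] ++ P else d.getD c [] := by
  unfold pvStepA
  rw [pvAppendFold_getD]
  by_cases hd : d.contains e = true
  · rw [if_pos hd]
  · have hd' : d.contains e = false := by simpa using hd
    rw [if_neg hd]
    by_cases hc : c = e
    · subst hc
      rw [if_pos rfl, if_pos rfl, PySem.Dict.getD_insert, if_pos rfl,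
          PySem.Dict.getD_of_not_contains d _ hd']
    · rw [if_neg hc, if_neg hc, PySem.Dict.getD_insert, if_neg hc]

theorem pvStepA_keys (P : List String) (d : PySem.Dict String (List String)) (e : String) :
    (pvStepA P d e).keys = PySem.Set.add d.keys e := by
  have hupd : ∀ (d' : PySem.Dict String (List String)), e ∈ d'.keys →
      (P.foldl (fun d x => d.modify e [] (fun v => v ++ [x])) d').keys = d'.keys := by
    intro d' he
    rw [PySem.Dict.keys_foldl_modify_key P (fun _ => e) ([] : List String)
          (fun _ x => fun v => v ++ [x]) d']
    apply pvSet_update_subset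
    intro y hy
    rcases List.mem_map.mp hy with ⟨a, _, rfl⟩
    exact he
  unfold pvStepA
  by_cases hd : d.contains e = true
  · have he : e ∈ d.keys := (PySem.Dict.contains_iff_mem_keys d e).mp hd
    rw [if_pos hd, hupd d he]
    exact (PySem.Set.add_of_mem he).symm
  · have hd' : d.contains e = false := by simpa using hd
    have he : e ∈ (d.insert e ([] : List String)).keys :=
      (PySem.Dict.contains_iff_mem_keys _ e).mp (PySem.Dict.contains_insert_self d e _)
    rw [if_neg hd, hupd _ he, PySem.Dict.keys_insert_of_not_contains d _ hd']
    have hne : e ∉ d.keys := fun hmem => hd ((PySem.Dict.contains_iff_mem_keys d e).mpr hmem)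
    exact (PySem.Set.add_of_not_mem hne).symm

theorem pvFoldA_getD (P L : List String) :
    ∀ (d : PySem.Dict String (List String)) (c : String),
      (L.foldl (pvStepA P) d).getD c [] =
        d.getD c [] ++ (List.replicate (L.count c) P).flatten := by
  induction L with
  | nil => intro d c; simp
  | cons e L ih =>
      intro d c
      simp only [List.foldl_cons]
      rw [ih, pvStepA_getD]
      by_cases hc : c = e
      · subst hc
        simp [List.count_cons_self, List.replicate_succ]
      · have hec : (e == c) = false := beq_eq_false_iff_ne.mpr (Ne.symm hc)
        simp [hc, List.count_cons, hec]

theorem pvFoldA_keys (P L : List String) :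
    ∀ (d : PySem.Dict String (List String)),
      (L.foldl (pvStepA P) d).keys = PySem.Set.update d.keys L := by
  induction L with
  | nil => intro d; rw [List.foldl_nil, PySem.Set.update_nil]
  | cons e L ih =>
      intro d
      rw [List.foldl_cons, ih, pvStepA_keys, PySem.Set.update_cons]

theorem pvA_body (path : List String) (res : PySem.Dict String (List String)) :
    pvAstep res path = path.foldl (pvStepA path) res := by
  have h1 : pvAstep res path = path.foldl (pvF path) res :=
    PySem.List.foldl_pyRange_zero_pyGetD path "" (pvF path) res
  have h2 : pvF path = pvStepA path := by
    funext d e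
    exact PySem.List.foldl_pyRange_zero_pyGetD path ""
      (fun (acc : PySem.Dict String (List String)) x => acc.modify e [] (fun v => v ++ [x])) _
  rw [h1, h2]

-- Value of A's accumulator after all paths, per key.
theorem pvAll_getD (paths : List (List String)) :
    ∀ (res : PySem.Dict String (List String)) (c : String),
      (paths.foldl pvAstep res).getD c [] =
        res.getD c [] ++ paths.flatMap (fun p => (List.replicate (p.count c) p).flatten) := by
  induction paths with
  | nil => intro res c; simp
  | cons path ps ih =>
      intro res c
      simp only [List.foldl_cons, List.flatMap_cons]
      rw [ih, pvA_body, pvFoldA_getD, List.append_assoc]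

-- Keys of A's accumulator after all paths.
theorem pvAll_keys (paths : List (List String)) :
    ∀ (res : PySem.Dict String (List String)),
      (paths.foldl pvAstep res).keys = PySem.Set.update res.keys (paths.flatMap (fun p => p)) := by
  induction paths with
  | nil => intro res; simp [PySem.Set.update_nil]
  | cons path ps ih =>
      intro res
      simp only [List.foldl_cons, List.flatMap_cons]
      rw [ih, pvA_body, pvFoldA_keys, PySem.Set.update_append]

-- B's per-path indexing step (the body of B's outer fold), named for the proofs.
def pvOccStep (occ : PySem.Dict String (List (List String))) (path : List String) :
    PySem.Dict String (List (List String)) :=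
  path.foldl (fun occ x => occ.modify x [] (fun v => v ++ [path])) occ

lemma pvOccFold_getD (P : List String) (L : List String) :
    ∀ (d : PySem.Dict String (List (List String))) (c : String),
      (L.foldl (fun d x => d.modify x [] (fun v => v ++ [P])) d).getD c [] =
        d.getD c [] ++ List.replicate (L.count c) P := by
  induction L with
  | nil => intro d c; simp
  | cons e L ih =>
      intro d c
      simp only [List.foldl_cons]
      rw [ih, PySem.Dict.getD_modify]
      by_cases hc : c = e
      · subst hc
        simp [List.count_cons_self, List.replicate_succ]
      · have hec : (e == c) = false := beq_eq_false_iff_ne.mpr (Ne.symm hc)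
        simp [hc, List.count_cons, hec]

lemma pvOcc_getD (paths : List (List String)) :
    ∀ (occ : PySem.Dict String (List (List String))) (c : String),
      (paths.foldl pvOccStep occ).getD c [] =
        occ.getD c [] ++ paths.flatMap (fun p => List.replicate (p.count c) p) := by
  induction paths with
  | nil => intro occ c; simp
  | cons path ps ih =>
      intro occ c
      simp only [List.foldl_cons, List.flatMap_cons]
      rw [ih]
      simp only [pvOccStep]
      rw [pvOccFold_getD, List.append_assoc]

lemma pvOcc_keys (paths : List (List String)) :
    ∀ (occ : PySem.Dict String (List (List String))),
      (paths.foldl pvOccStep occ).keys = PySem.Set.update occ.keys (paths.flatMap (fun p => p)) := by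
  induction paths with
  | nil => intro occ; simp [PySem.Set.update_nil]
  | cons path ps ih =>
      intro occ
      simp only [List.foldl_cons, List.flatMap_cons]
      rw [ih]
      simp only [pvOccStep]
      rw [PySem.Dict.keys_foldl_modify, PySem.Set.update_append]

-- ===== VERDICT (by name: the statement is the Claim_ definition above) =====
theorem generate_candidate_fact_path_spec : Claim_equal_generate_candidate_fact_path := by
  intro paths _
  show (paths.foldl pvAstep PySem.Dict.empty).items = generate_candidate_fact_path_alt paths
  have hAkeys : (paths.foldl pvAstep PySem.Dict.empty).keys
      = PySem.Set.ofList (paths.flatMap (fun p => p)) := by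
    rw [pvAll_keys, PySem.Dict.keys_empty, PySem.Set.update_nil_left]
  have hAnod : (paths.foldl pvAstep PySem.Dict.empty).keys.Nodup := by
    rw [hAkeys]; exact PySem.Set.nodup_ofList _
  have hBkeys : (paths.foldl pvOccStep PySem.Dict.empty).keys
      = PySem.Set.ofList (paths.flatMap (fun p => p)) := by
    rw [pvOcc_keys, PySem.Dict.keys_empty, PySem.Set.update_nil_left]
  have hBnod : (paths.foldl pvOccStep PySem.Dict.empty).keys.Nodup := by
    rw [hBkeys]; exact PySem.Set.nodup_ofList _
  show _ = ((paths.foldl pvOccStep PySem.Dict.empty).items).map (fun p => (p.1, p.2.flatMap (fun q => q)))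
  rw [PySem.Dict.items_eq_map_keys _ hAnod ([] : List String), hAkeys,
      PySem.Dict.items_eq_map_keys _ hBnod ([] : List (List String)), hBkeys,
      List.map_map]
  apply List.map_congr_left
  intro k _
  simp only [Function.comp]
  rw [pvAll_getD, pvOcc_getD, PySem.Dict.getD_empty, PySem.Dict.getD_empty]
  simp [List.flatMap_assoc, List.flatMap_id']
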